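-- pv_equiv track=rewrite | github.com/Fliegenbart/ViralFlux-Media-Intelligence | backend/app/services/media/cockpit/media_spending_truth.py | _derive_release_mode
-- ===== SOURCE A (Python) =====
-- from typing import Any, Iterable, Mapping
--
-- def _derive_release_mode(gate_evaluations: list[Mapping[str, Any]]) -> str:
--     hard_fails = [
--         gate
--         for gate in gate_evaluations
--         if gate.get("severity") == "hard" and gate.get("status") == "failed"
--     ]
--     if hard_fails:
--         return "blocked"
--     if any(gate.get("status") == "insufficient_evidence" for gate in gate_evaluations):
--         return "shadow_only"
--     limited_fails = [
--         gate
--         for gate in gate_evaluations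
--         if gate.get("severity") == "limited" and gate.get("status") in {"failed", "warning"}
--     ]
--     if limited_fails:
--         return "limited"
--     return "approved"
-- ===== SOURCE B (Python) =====
-- def _derive_release_mode(gate_evaluations):
--     has_hard_fail = False
--     has_insufficient = False
--     has_limited_fail = False
--     for gate in gate_evaluations:
--         severity = gate.get("severity")
--         status = gate.get("status")
--         has_hard_fail = has_hard_fail or (severity == "hard" and status == "failed")
--         has_insufficient = has_insufficient or status == "insufficient_evidence"
--         has_limited_fail = has_limited_fail or (severity == "limited" and status in ("failed", "warning"))
--     if has_hard_fail:
--         return "blocked"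
--     if has_insufficient:
--         return "shadow_only"
--     if has_limited_fail:
--         return "limited"
--     return "approved"
-- ===== Notes on version B (the rewrite author's own statement) =====
-- stated objective: alternative
-- what changed: Replaced three separate filtered scans with early returns by a single pass that accumulates three boolean flags and decides the mode after the loop.
import Mathlib
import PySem

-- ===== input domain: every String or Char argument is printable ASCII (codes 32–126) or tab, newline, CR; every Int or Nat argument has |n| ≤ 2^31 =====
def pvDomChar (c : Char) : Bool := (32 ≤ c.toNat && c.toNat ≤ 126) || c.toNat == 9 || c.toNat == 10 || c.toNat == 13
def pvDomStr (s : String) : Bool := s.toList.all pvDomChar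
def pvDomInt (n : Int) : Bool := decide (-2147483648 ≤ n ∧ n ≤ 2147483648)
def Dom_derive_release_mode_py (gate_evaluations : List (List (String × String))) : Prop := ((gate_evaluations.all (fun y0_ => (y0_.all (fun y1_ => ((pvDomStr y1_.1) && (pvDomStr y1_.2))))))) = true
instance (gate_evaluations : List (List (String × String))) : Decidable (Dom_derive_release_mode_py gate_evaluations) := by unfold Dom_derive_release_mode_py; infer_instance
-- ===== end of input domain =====

-- B replaces A's three filtered scans with a single flag-accumulating pass; same return value, alternative decomposition.

-- ===== PORT A =====
-- gate.get(k): first-match lookup in the association list (exact for Python dict.get, none = missing key)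
def pvLookup : List (String × String) → String → Option String
  | [], _ => none
  | (k, v) :: t, x => if k == x then some v else pvLookup t x

def pvHardFail (g : List (String × String)) : Bool :=
  pvLookup g "severity" == some "hard" && pvLookup g "status" == some "failed"
def pvInsufficient (g : List (String × String)) : Bool :=
  pvLookup g "status" == some "insufficient_evidence"
def pvLimitedFail (g : List (String × String)) : Bool :=
  pvLookup g "severity" == some "limited" &&
    (pvLookup g "status" == some "failed" || pvLookup g "status" == some "warning")

def derive_release_mode_py (gate_evaluations : List (List (String × String))) : String :=
  let hard_fails := gate_evaluations.filter pvHardFail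
  if !hard_fails.isEmpty then "blocked"
  else if gate_evaluations.any pvInsufficient then "shadow_only"
  else
    let limited_fails := gate_evaluations.filter pvLimitedFail
    if !limited_fails.isEmpty then "limited" else "approved"

-- ===== PORT B =====
-- one pass, three boolean flags (as in Source B)
def pvStep (st : Bool × Bool × Bool) (g : List (String × String)) : Bool × Bool × Bool :=
  let severity := pvLookup g "severity"
  let status := pvLookup g "status"
  ( st.1 || (severity == some "hard" && status == some "failed"),
    st.2.1 || status == some "insufficient_evidence",
    st.2.2 || (severity == some "limited" && (status == some "failed" || status == some "warning")) )

def derive_release_mode_py_alt (gate_evaluations : List (List (String × String))) : String :=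
  let flags := gate_evaluations.foldl pvStep (false, false, false)
  if flags.1 then "blocked"
  else if flags.2.1 then "shadow_only"
  else if flags.2.2 then "limited"
  else "approved"

-- ===== PRECONDITION & SPEC =====
def Spec_derive_release_mode_py (gate_evaluations : List (List (String × String))) (out : String) : Prop := out = derive_release_mode_py_alt gate_evaluations
instance (gate_evaluations : List (List (String × String))) (out : String) : Decidable (Spec_derive_release_mode_py gate_evaluations out) := by unfold Spec_derive_release_mode_py; infer_instance

-- ===== CLAIM (what is proved, stated in full; the proofs are below) =====
def Claim_equal_derive_release_mode_py : Prop := ∀ (gate_evaluations : List (List (String × String))), Dom_derive_release_mode_py gate_evaluations → Spec_derive_release_mode_py gate_evaluations (derive_release_mode_py gate_evaluations)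

-- ===== LEMMAS AND PROOFS =====

-- the fold computes exactly the three 'any' flags
theorem pv_fold_eq (ge : List (List (String × String))) :
    ∀ a b c : Bool, ge.foldl pvStep (a, b, c) =
      (a || ge.any pvHardFail, b || ge.any pvInsufficient, c || ge.any pvLimitedFail) := by
  induction ge with
  | nil => simp
  | cons g t ih =>
    intro a b c
    rw [List.foldl_cons, ih]
    simp [pvStep, pvHardFail, pvInsufficient, pvLimitedFail, Bool.or_assoc]

theorem pv_filter_isEmpty (p : List (String × String) → Bool)
    (ge : List (List (String × String))) : (ge.filter p).isEmpty = !ge.any p := by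
  induction ge with
  | nil => simp
  | cons g t ih => by_cases h : p g <;> simp [h, ih]

-- ===== VERDICT (by name: the statement is the Claim_ definition above) =====
theorem derive_release_mode_py_spec : Claim_equal_derive_release_mode_py := by
  intro ge _
  unfold Spec_derive_release_mode_py derive_release_mode_py derive_release_mode_py_alt
  rw [pv_fold_eq]
  simp only [Bool.false_or, pv_filter_isEmpty, Bool.not_not]
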